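-- pv_equiv track=rewrite | github.com/jinhyungrhee/Problem-Solving | Programmers/고득점Kit/기능개발B.py | solution
-- ===== SOURCE A (Python) =====
-- import math
--
-- def solution(progresses, speeds):
--     answer = []
--     left = [100 - x for x in progresses]
--     # 소요시간 미리 계산
--     result = [math.ceil(a / b) for a, b in zip(left, speeds)]
--     # case1 : [7, 3, 9]
--     # case2 : [5, 10, 1, 1, 20, 1]
--
--     # front : 가장 오래걸린 소요 시간 인덱스
--     front = 0
--
--     for idx in range(len(result)): # idx : 0 1 2 || idx : 0 1 2 3 4 5
--         if result[idx] > result[front]: # idx == 2 || idx == 1(10), 4(20)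
--             answer.append(idx - front) # 2 || 1(1 - 0), 3(4 - 1)
--             # front에 가장 오래걸린 소요 시간 인덱스 저장
--             front = idx # front : 2 || front : 1, 4
--
--     # 나머지 남아있는 것 출력
--     answer.append(len(result) - front) # 1 (3 - 2) / 2 (6 - 4)
--
--     return answer
-- ===== SOURCE B (Python) =====
-- import math
--
-- def solution(progresses, speeds):
--     # Stage 1: completion day of each feature.
--     days = [math.ceil((100 - p) / s) for p, s in zip(progresses, speeds)]
--     # Stage 2: release day of each feature = running maximum of completion days.
--     releases = []
--     for d in days:
--         releases.append(releases[-1] if releases and releases[-1] >= d else d)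
--     # Stage 3: run-length encode the release days; the current run is emitted
--     # whenever the release day changes, and the final run is emitted at the end.
--     sizes = []
--     run = 0
--     for i, r in enumerate(releases):
--         if i and r != releases[i - 1]:
--             sizes.append(run)
--             run = 0
--         run += 1
--     sizes.append(run)
--     return sizes
-- ===== Notes on version B (the rewrite author's own statement) =====
-- stated objective: alternative
-- what changed: A makes one scan that compares each completion day against the current batch leader days[front] and emits index differences (idx - front) plus a trailing remainder append; B is a staged pipeline with no leader index and no index arithmetic: it materializes each feature's release day as the running maximum of completion days, then run-length-encodes that monotone sequence by comparing adjacent release days, emitting run counters.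
import Mathlib
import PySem

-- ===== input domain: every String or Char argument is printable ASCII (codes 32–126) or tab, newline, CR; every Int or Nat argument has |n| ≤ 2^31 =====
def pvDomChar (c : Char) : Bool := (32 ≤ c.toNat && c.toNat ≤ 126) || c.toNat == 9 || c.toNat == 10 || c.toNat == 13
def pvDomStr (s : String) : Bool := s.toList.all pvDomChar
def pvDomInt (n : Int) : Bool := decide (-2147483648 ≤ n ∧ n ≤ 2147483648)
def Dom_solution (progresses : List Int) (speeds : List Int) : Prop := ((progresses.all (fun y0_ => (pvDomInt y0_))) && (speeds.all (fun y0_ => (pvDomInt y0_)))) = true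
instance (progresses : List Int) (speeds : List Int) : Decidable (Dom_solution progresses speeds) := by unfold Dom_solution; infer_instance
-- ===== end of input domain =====

-- B replaces A's leader-index scan (compare against days[front], emit idx - front, trailing
-- remainder append) by a staged pipeline: materialize each feature's release day as the
-- running maximum of completion days, then run-length-encode that monotone sequence.

-- math.ceil(a / b): exact integer ceiling -((-a) // b). On Dom (|numerator| ≤ 2^31 + 100,
-- |b| ≤ 2^31, b ≠ 0 by Pre_) Python's float division never rounds across an integer
-- (that would need |numerator| ≥ 2^53), so this is exact there. Shared: both Pythons
-- contain the same expression math.ceil(… / …).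
def pyCeil (a b : Int) : Int := -(PySem.Int.floordiv (-a) b)

-- ===== PORT A =====
-- the 'for idx in range(len(result))' loop of A, as structural recursion on idx
def aScan (result : List Int) (idx front : Nat) (answer : List Int) : List Int × Nat :=
  if idx < result.length then
    if PySem.List.pyGetD result (idx : Int) 0 > PySem.List.pyGetD result (front : Int) 0 then
      aScan result (idx + 1) idx (answer ++ [(idx : Int) - (front : Int)])
    else
      aScan result (idx + 1) front answer
  else (answer, front)
termination_by result.length - idx

def solution (progresses : List Int) (speeds : List Int) : List Int :=
  let left := progresses.map (fun x => (100 : Int) - x)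
  let result := (left.zip speeds).map (fun ab => pyCeil ab.1 ab.2)
  let p := aScan result 0 0 []
  p.1 ++ [((result.length : Int)) - (p.2 : Int)]

-- ===== PORT B =====
-- body of B's stage-2 loop: 'releases.append(releases[-1] if releases and releases[-1] >= d else d)'
def relStep (rel : List Int) (d : Int) : List Int :=
  rel ++ [if rel ≠ [] ∧ PySem.List.pyGetD rel (-1) 0 ≥ d then PySem.List.pyGetD rel (-1) 0 else d]

-- body of B's stage-3 loop over 'enumerate(releases)': state = (sizes, run)
def rleStep (releases : List Int) (acc : List Int × Int) (ir : Int × Int) : List Int × Int :=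
  if ir.1 ≠ 0 ∧ ir.2 ≠ PySem.List.pyGetD releases (ir.1 - 1) 0 then
    (acc.1 ++ [acc.2], 0 + 1)
  else
    (acc.1, acc.2 + 1)

def solution_alt (progresses : List Int) (speeds : List Int) : List Int :=
  let days := (progresses.zip speeds).map (fun q => pyCeil (100 - q.1) q.2)
  let releases := days.foldl relStep []
  let st := (PySem.List.enumerate releases 0).foldl (rleStep releases) ([], 0)
  st.1 ++ [st.2]

-- ===== PRECONDITION & SPEC =====
-- Pre_ excludes exactly the inputs where a zero speed is actually paired with a progress
-- by zip: there both Pythons raise ZeroDivisionError (A returns nothing there).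
def Pre_solution (progresses : List Int) (speeds : List Int) : Prop :=
  (0 : Int) ∉ speeds.take progresses.length
instance (progresses : List Int) (speeds : List Int) : Decidable (Pre_solution progresses speeds) := by
  unfold Pre_solution; infer_instance

def pvWitness_solution : List Int × List Int := ([93, 30, 55], [1, 30, 5])

def Spec_solution (progresses : List Int) (speeds : List Int) (out : List Int) : Prop :=
  out = solution_alt progresses speeds
instance (progresses : List Int) (speeds : List Int) (out : List Int) : Decidable (Spec_solution progresses speeds out) := by
  unfold Spec_solution; infer_instance

-- ===== CLAIM (what is proved, stated in full; the proofs are below) =====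
def Claim_equal_solution : Prop := ∀ (progresses : List Int) (speeds : List Int), Dom_solution progresses speeds → Pre_solution progresses speeds → Spec_solution progresses speeds (solution progresses speeds)

-- ===== LEMMAS AND PROOFS =====

-- the running-maximum sequence continuing from a current maximum m (proof-side model of stage 2)
def pm : List Int → Int → List Int
  | [], _ => []
  | d :: t, m => (if m ≥ d then m else d) :: pm t (if m ≥ d then m else d)

-- stage 2's foldl, started from a nonempty accumulator whose last element is m, appends pm
theorem relFold_eq (t : List Int) :
    ∀ (acc : List Int) (h : acc ≠ []) (m : Int), acc.getLast h = m →
      t.foldl relStep acc = acc ++ pm t m := by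
  induction t with
  | nil => intro acc h m hl; simp [pm]
  | cons d t ih =>
    intro acc h m hl
    have hg : PySem.List.pyGetD acc (-1) 0 = m := by
      rw [PySem.List.pyGetD_neg_one acc 0 h, hl]
    have hstep : relStep acc d = acc ++ [if m ≥ d then m else d] := by
      unfold relStep
      rw [hg]
      by_cases hc : m ≥ d
      · rw [if_pos ⟨h, hc⟩, if_pos hc]
      · rw [if_neg (by tauto), if_neg hc]
    rw [List.foldl_cons, hstep,
      ih (acc ++ [if m ≥ d then m else d]) (by simp) (if m ≥ d then m else d) (by simp), pm]
    simp

-- both ports compute the same completion-days list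
theorem days_eq (ps ss : List Int) :
    ((ps.map (fun x => (100 : Int) - x)).zip ss).map (fun ab => pyCeil ab.1 ab.2)
      = (ps.zip ss).map (fun q => pyCeil (100 - q.1) q.2) := by
  induction ps generalizing ss with
  | nil => simp
  | cons a t ih => cases ss with
    | nil => simp
    | cons b u => simp [ih]

-- simultaneous induction: A's scan state (answer, front) corresponds to B's stage-3 state
-- (sizes, run) via sizes = answer, run = idx - front, releases[idx-1] = days[front]
theorem main_inv (days releases : List Int) :
    ∀ (u : List Int) (idx front : Nat) (ans : List Int) (run : Int),
      days.drop idx = u →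
      releases.drop idx = pm u (days.getD front 0) →
      front < idx → idx ≤ days.length →
      releases.getD (idx - 1) 0 = days.getD front 0 →
      run = (idx : Int) - (front : Int) →
      (aScan days idx front ans).1 ++ [((days.length : Int)) - (((aScan days idx front ans).2 : Nat) : Int)]
        = ((PySem.List.enumerate (releases.drop idx) (idx : Int)).foldl (rleStep releases) (ans, run)).1
          ++ [((PySem.List.enumerate (releases.drop idx) (idx : Int)).foldl (rleStep releases) (ans, run)).2] := by
  intro u
  induction u with
  | nil =>
    intro idx front ans run hdu hdr hfi hle hprev hrun
    have hidx : days.length ≤ idx := by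
      have := congrArg List.length hdu
      simp at this
      omega
    rw [aScan, if_neg (by omega), hdr]
    simp only [pm, PySem.List.enumerate_nil, List.foldl_nil]
    have : ((days.length : Int)) - (front : Int) = run := by omega
    rw [this]
  | cons d u ih =>
    intro idx front ans run hdu hdr hfi hle hprev hrun
    set M := days.getD front 0 with hM
    have hlt : idx < days.length := by
      by_contra hn
      rw [List.drop_eq_nil_of_le (by omega)] at hdu
      exact List.cons_ne_nil d u hdu.symm
    have hd : days.getD idx 0 = d := by
      rw [List.drop_eq_getElem_cons hlt] at hdu
      have := List.head_eq_of_cons_eq hdu.symm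
      simp [List.getD_eq_getElem?_getD, List.getElem?_eq_getElem hlt, this]
    have hdu' : days.drop (idx + 1) = u := by
      rw [List.drop_eq_getElem_cons hlt] at hdu
      exact (List.tail_eq_of_cons_eq hdu.symm).symm
    set x := if M ≥ d then M else d with hx
    have hdrx : releases.drop idx = x :: pm u x := by rw [hdr, pm]
    have hrx : releases.getD idx 0 = x := by
      rw [List.getD_eq_getElem?_getD, ← Nat.add_zero idx, ← List.getElem?_drop, hdrx]
      rfl
    have hdr' : releases.drop (idx + 1) = pm u x := by
      have : releases.drop (idx + 1) = (releases.drop idx).drop 1 := by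
        rw [List.drop_drop]
      rw [this, hdrx, List.drop_one, List.tail_cons]
    -- A's branch condition is d > M
    have hgA : PySem.List.pyGetD days (idx : Int) 0 = d := by
      rw [PySem.List.pyGetD_natCast, hd]
    have hgF : PySem.List.pyGetD days (front : Int) 0 = M := by
      rw [PySem.List.pyGetD_natCast]
    -- B's stage-3 lookup releases[idx - 1] is days[front]
    have hgP : PySem.List.pyGetD releases ((idx : Int) - 1) 0 = M := by
      have h1 : ((idx : Int)) - 1 = (((idx - 1 : Nat)) : Int) := by omega
      rw [h1, PySem.List.pyGetD_natCast, hprev]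
    rw [aScan, if_pos hlt, hgA, hgF, hdrx, PySem.List.enumerate_cons, List.foldl_cons]
    have hcast : ((idx : Int) + 1) = (((idx + 1 : Nat)) : Int) := by push_cast; ring
    by_cases hgt : d > M
    · -- new release day: A emits idx - front; B emits the finished run and restarts
      have hxd : x = d := by rw [hx, if_neg (by omega)]
      have hstep : rleStep releases (ans, run) ((idx : Int), x) = (ans ++ [run], 0 + 1) := by
        unfold rleStep
        rw [if_pos ⟨by simp; omega, by rw [hgP]; simp; omega⟩]
      rw [if_pos hgt, hstep, hcast, hrun, ← hdr']
      exact ih (idx + 1) idx (ans ++ [(idx : Int) - (front : Int)]) (0 + 1) hdu'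
        (by rw [hdr', hxd, hd]) (by omega) (by omega) (by rw [Nat.add_sub_cancel, hrx, hxd, hd])
        (by push_cast; ring)
    · -- same release day: both just extend the current batch
      have hxM : x = M := by rw [hx, if_pos (by omega)]
      have hstep : rleStep releases (ans, run) ((idx : Int), x) = (ans, run + 1) := by
        unfold rleStep
        rw [if_neg (by rw [hgP, hxM]; tauto)]
      rw [if_neg hgt, hstep, hcast, ← hdr']
      exact ih (idx + 1) front ans (run + 1) hdu' (by rw [hdr', hxM]) (by omega) (by omega)
        (by rw [Nat.add_sub_cancel, hrx, hxM]) (by omega)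

-- A's whole computation equals B's stage-2 + stage-3 pipeline, for any completion-days list
theorem top_eq (days : List Int) :
    (aScan days 0 0 []).1 ++ [((days.length : Int)) - (((aScan days 0 0 []).2 : Nat) : Int)]
      = ((PySem.List.enumerate (days.foldl relStep []) 0).foldl (rleStep (days.foldl relStep [])) ([], 0)).1
        ++ [((PySem.List.enumerate (days.foldl relStep []) 0).foldl (rleStep (days.foldl relStep [])) ([], 0)).2] := by
  cases days with
  | nil =>
    rw [aScan]
    simp [PySem.List.enumerate_nil]
  | cons d0 rest =>
    have hrel : (d0 :: rest).foldl relStep [] = d0 :: pm rest d0 := by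
      rw [List.foldl_cons]
      have hstep : relStep [] d0 = [d0] := by
        unfold relStep
        rw [if_neg (by tauto)]
        rfl
      rw [hstep, relFold_eq rest [d0] (by simp) d0 (by simp)]
      rfl
    have hA : aScan (d0 :: rest) 0 0 [] = aScan (d0 :: rest) 1 0 [] := by
      rw [aScan, if_pos (by simp), if_neg (lt_irrefl _)]
    have hB1 : PySem.List.enumerate ((d0 :: rest).foldl relStep []) 0
        = (0, d0) :: PySem.List.enumerate (pm rest d0) 1 := by
      rw [hrel, PySem.List.enumerate_cons]
      norm_num
    have hstep3 : rleStep ((d0 :: rest).foldl relStep []) ([], 0) (0, d0) = ([], 0 + 1) := by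
      unfold rleStep
      rw [if_neg (by tauto)]
    rw [hA, hB1, List.foldl_cons, hstep3]
    have hdrop1 : ((d0 :: rest).foldl relStep []).drop 1 = pm rest d0 := by rw [hrel]; rfl
    have := main_inv (d0 :: rest) ((d0 :: rest).foldl relStep []) rest 1 0 [] (0 + 1)
      rfl (by rw [hdrop1]; rfl) (by omega) (by simp)
      (by rw [hrel]; rfl) (by norm_num)
    rw [← hdrop1]
    have h1 : ((1 : Nat) : Int) = (1 : Int) := by norm_num
    rw [← h1]
    exact this

-- ===== VERDICT (by name: the statement is the Claim_ definition above) =====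
theorem solution_spec : Claim_equal_solution := by
  intro ps ss _ _
  show solution ps ss = solution_alt ps ss
  unfold solution solution_alt
  simp only
  rw [days_eq]
  exact top_eq _
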